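-- pv_equiv track=rewrite | github.com/limarich/MontadorMips | montador.py | retiraComentario
-- ===== SOURCE A (Python) =====
-- def retiraComentario(string):
--     str = ""
--     for ch in string:
--         if(ch != "#"):
--             str += ch
--         if(ch == "#"):
--             break
--     return str
-- ===== SOURCE B (Python) =====
-- def retiraComentario(string):
--     i = string.find('#')
--     return string if i == -1 else string[:i]
-- ===== Notes on version B (the rewrite author's own statement) =====
-- stated objective: simpler
-- what changed: Replaces the character-by-character accumulation loop with break by a single str.find of the delimiter followed by one slice (full string when it is absent).
import Mathlib
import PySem

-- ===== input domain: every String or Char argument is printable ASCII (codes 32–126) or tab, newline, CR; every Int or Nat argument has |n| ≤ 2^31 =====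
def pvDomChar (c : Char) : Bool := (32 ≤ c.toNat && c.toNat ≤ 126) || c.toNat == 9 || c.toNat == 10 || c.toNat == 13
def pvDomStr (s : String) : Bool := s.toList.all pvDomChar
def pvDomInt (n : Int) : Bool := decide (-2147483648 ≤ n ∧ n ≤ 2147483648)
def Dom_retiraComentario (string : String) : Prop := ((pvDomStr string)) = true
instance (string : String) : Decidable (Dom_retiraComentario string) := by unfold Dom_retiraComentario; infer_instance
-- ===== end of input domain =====

-- B replaces A's per-character accumulation loop (with break at '#') by find + slice; objective: simpler.
-- ===== PORT A =====
def pvAGo (acc : List Char) : List Char → List Char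
  | [] => acc
  | ch :: rest =>
    let acc' := if ch ≠ '#' then acc ++ [ch] else acc
    if ch = '#' then acc' else pvAGo acc' rest

def retiraComentario (string : String) : String := String.ofList (pvAGo [] string.toList)

-- ===== PORT B =====
def retiraComentario_alt (string : String) : String :=
  let i := PySem.Str.find string "#"
  if i = -1 then string else PySem.Str.slice string none (some i)

-- ===== PRECONDITION & SPEC =====
def Spec_retiraComentario (string : String) (out : String) : Prop := out = retiraComentario_alt string
instance (string : String) (out : String) : Decidable (Spec_retiraComentario string out) := by unfold Spec_retiraComentario; infer_instance

-- ===== CLAIM (what is proved, stated in full; the proofs are below) =====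
def Claim_equal_retiraComentario : Prop := ∀ (string : String), Dom_retiraComentario string → Spec_retiraComentario string (retiraComentario string)

-- ===== LEMMAS AND PROOFS =====

-- A's loop appends each char until it sees '#', then breaks: it computes takeWhile (≠ '#').
theorem pvAGo_eq (l : List Char) (acc : List Char) :
    pvAGo acc l = acc ++ l.takeWhile (fun c => c ≠ '#') := by
  induction l generalizing acc with
  | nil => simp [pvAGo]
  | cons c t ih =>
    by_cases hc : c = '#'
    · simp [pvAGo, hc]
    · simp [pvAGo, hc, ih]

-- If position n holds the first '#', takeWhile (≠ '#') is take n.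
theorem takeWhile_eq_take_of_first (l : List Char) (n : Nat)
    (h1 : ∀ j, j < n → ¬ ['#'] <+: l.drop j) (h2 : ['#'] <+: l.drop n) :
    l.takeWhile (fun c => c ≠ '#') = l.take n := by
  induction l generalizing n with
  | nil => simp at h2
  | cons c t ih =>
    cases n with
    | zero =>
      obtain ⟨u, hu⟩ := h2
      simp at hu
      simp [List.takeWhile, ← hu.1]
    | succ m =>
      have hc : c ≠ '#' := by
        intro h
        exact h1 0 (Nat.succ_pos m) ⟨t, by simp [h]⟩
      simp only [List.takeWhile_cons, List.take_succ_cons]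
      rw [ih m (fun j hj => h1 (j+1) (Nat.succ_lt_succ hj)) h2]
      simp [hc]

theorem retiraComentario_spec : Claim_equal_retiraComentario := by
  intro s _
  unfold Spec_retiraComentario retiraComentario retiraComentario_alt
  rw [pvAGo_eq]
  simp only [List.nil_append, PySem.Str.find, PySem.Str.slice, PySem.Chars.slice]
  have htl : "#".toList = ['#'] := rfl
  rw [htl]
  by_cases h : PySem.Chars.find s.toList ['#'] = -1
  · rw [if_pos h]
    have hni : ¬ ['#'] <:+: s.toList := (PySem.Chars.find_eq_neg_one_iff _ _).mp h
    have hmem : '#' ∉ s.toList := fun hm => hni ((List.singleton_infix_iff '#' s.toList).mpr hm)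
    have : s.toList.takeWhile (fun c => c ≠ '#') = s.toList := by
      rw [List.takeWhile_eq_self_iff]
      intro a ha
      simp only [ne_eq, decide_not, Bool.not_eq_eq_eq_not, Bool.not_true, decide_eq_false_iff_not]
      exact fun h' => hmem (h' ▸ ha)
    rw [this, String.ofList_toList]
  · rw [if_neg h]
    have h0 : 0 ≤ PySem.Chars.find s.toList ['#'] := by
      have := PySem.Chars.neg_one_le_find s.toList ['#']
      omega
    obtain ⟨hp, hmin⟩ := PySem.Chars.find_spec h0
    rw [PySem.List.slice_to _ h0]
    exact congrArg String.ofList (takeWhile_eq_take_of_first _ _ hmin hp)
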